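-- pv_equiv track=rewrite | github.com/shmidtelson/padel-tournaments | backend/app/domain/services.py | generate_by_ranking_pairs
-- ===== SOURCE A (Python) =====
-- from typing import Sequence
--
-- def generate_by_ranking_pairs(
--     player_ids_ordered_by_points: Sequence[int],
-- ) -> list[tuple[tuple[int, int], tuple[int, int]]]:
--     """
--     Weak+strong vs weak+strong: in each group of 4 by ranking, team1 = 1st+3rd, team2 = 2nd+4th.
--     player_ids_ordered_by_points: sorted by total_points descending (best first).
--     """
--     ids = list(player_ids_ordered_by_points)
--     if len(ids) % 4 != 0:
--         raise ValueError("Player count must be divisible by 4")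
--     result = []
--     for i in range(0, len(ids), 4):
--         team1 = (ids[i], ids[i + 2])      # 1st + 3rd
--         team2 = (ids[i + 1], ids[i + 3])  # 2nd + 4th
--         result.append((team1, team2))
--     return result
-- ===== SOURCE B (Python) =====
-- def generate_by_ranking_pairs(player_ids_ordered_by_points):
--     ids = list(player_ids_ordered_by_points)
--     if len(ids) % 4 != 0:
--         raise ValueError("Player count must be divisible by 4")
--     # Column-wise: ranks at even positions form team1 members, odd positions team2 members.
--     evens = ids[0::2]
--     odds = ids[1::2]
--     team1s = list(zip(evens[0::2], evens[1::2]))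
--     team2s = list(zip(odds[0::2], odds[1::2]))
--     return list(zip(team1s, team2s))
-- ===== Notes on version B (the rewrite author's own statement) =====
-- stated objective: alternative
-- what changed: Replaces the single row-indexed loop over range(0, n, 4) with staged whole-list passes: split the list by index parity into evens/odds, pair up consecutive elements of each half, then zip the two team lists together; no per-group index arithmetic remains.
import Mathlib
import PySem

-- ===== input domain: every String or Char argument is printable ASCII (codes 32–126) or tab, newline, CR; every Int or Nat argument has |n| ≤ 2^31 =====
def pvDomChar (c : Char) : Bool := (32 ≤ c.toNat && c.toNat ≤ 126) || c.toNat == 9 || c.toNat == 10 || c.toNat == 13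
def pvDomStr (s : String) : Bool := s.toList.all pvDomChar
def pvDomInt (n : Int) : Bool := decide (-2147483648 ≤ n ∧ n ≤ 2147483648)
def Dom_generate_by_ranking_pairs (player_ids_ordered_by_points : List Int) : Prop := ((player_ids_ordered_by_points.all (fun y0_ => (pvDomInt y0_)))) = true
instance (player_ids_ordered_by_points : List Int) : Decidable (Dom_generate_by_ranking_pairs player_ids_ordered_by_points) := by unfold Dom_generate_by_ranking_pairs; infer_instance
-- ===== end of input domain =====

-- B replaces A's row-indexed loop over range(0, n, 4) with staged whole-list passes:
-- parity split into evens/odds, pair up each half, zip the team lists (objective: alternative).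

-- ===== PORT A =====
-- literal port: guard, then for i in range(0, len, 4): append ((ids[i], ids[i+2]), (ids[i+1], ids[i+3]))
-- (the 'raise ValueError' branch has no value; the port returns [] there, excluded by Pre_)
def generate_by_ranking_pairs (player_ids_ordered_by_points : List Int) : List ((Int × Int) × (Int × Int)) :=
  let ids := player_ids_ordered_by_points
  if (ids.length : Int) % 4 ≠ 0 then []
  else
    (PySem.List.pyRange 0 (ids.length : Int) 4).foldl
      (fun result i =>
        result ++ [((PySem.List.pyGetD ids i 0, PySem.List.pyGetD ids (i + 2) 0),
                    (PySem.List.pyGetD ids (i + 1) 0, PySem.List.pyGetD ids (i + 3) 0))]) []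

-- ===== PORT B =====
-- xs[0::2] (every second element starting at the head), ported by hand; exact for step-2 slices
def pvStride2 : List Int → List Int
  | [] => []
  | [a] => [a]
  | a :: _ :: rest => a :: pvStride2 rest

-- Source B: evens = ids[0::2]; odds = ids[1::2]; team1s = zip(evens[0::2], evens[1::2]);
-- team2s = zip(odds[0::2], odds[1::2]); return zip(team1s, team2s)
def generate_by_ranking_pairs_alt (player_ids_ordered_by_points : List Int) : List ((Int × Int) × (Int × Int)) :=
  let ids := player_ids_ordered_by_points
  if (ids.length : Int) % 4 ≠ 0 then []
  else
    let evens := pvStride2 ids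
    let odds := pvStride2 (ids.drop 1)
    let team1s := List.zip (pvStride2 evens) (pvStride2 (evens.drop 1))
    let team2s := List.zip (pvStride2 odds) (pvStride2 (odds.drop 1))
    List.zip team1s team2s

-- ===== PRECONDITION & SPEC =====
-- Pre_ excludes exactly the inputs whose length is not divisible by 4, on which A raises ValueError.
def Pre_generate_by_ranking_pairs (player_ids_ordered_by_points : List Int) : Prop :=
  player_ids_ordered_by_points.length % 4 = 0
instance (player_ids_ordered_by_points : List Int) : Decidable (Pre_generate_by_ranking_pairs player_ids_ordered_by_points) := by unfold Pre_generate_by_ranking_pairs; infer_instance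

def pvWitness_generate_by_ranking_pairs : List Int := [1, 2, 3, 4, 5, 6, 7, 8]

def Spec_generate_by_ranking_pairs (player_ids_ordered_by_points : List Int) (out : List ((Int × Int) × (Int × Int))) : Prop := out = generate_by_ranking_pairs_alt player_ids_ordered_by_points
instance (player_ids_ordered_by_points : List Int) (out : List ((Int × Int) × (Int × Int))) : Decidable (Spec_generate_by_ranking_pairs player_ids_ordered_by_points out) := by unfold Spec_generate_by_ranking_pairs; infer_instance

-- ===== CLAIM (what is proved, stated in full; the proofs are below) =====
def Claim_equal_generate_by_ranking_pairs : Prop := ∀ (player_ids_ordered_by_points : List Int), Dom_generate_by_ranking_pairs player_ids_ordered_by_points → Pre_generate_by_ranking_pairs player_ids_ordered_by_points → Spec_generate_by_ranking_pairs player_ids_ordered_by_points (generate_by_ranking_pairs player_ids_ordered_by_points)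

-- ===== LEMMAS AND PROOFS =====

-- the per-group tuple A builds from index i
def pvG (ids : List Int) (i : Int) : (Int × Int) × (Int × Int) :=
  ((PySem.List.pyGetD ids i 0, PySem.List.pyGetD ids (i + 2) 0),
   (PySem.List.pyGetD ids (i + 1) 0, PySem.List.pyGetD ids (i + 3) 0))

-- B's result without the guard
def pvCols (ids : List Int) : List ((Int × Int) × (Int × Int)) :=
  let evens := pvStride2 ids
  let odds := pvStride2 (ids.drop 1)
  List.zip (List.zip (pvStride2 evens) (pvStride2 (evens.drop 1)))
           (List.zip (pvStride2 odds) (pvStride2 (odds.drop 1)))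

lemma pvStride2_cons (x : Int) (xs : List Int) :
    pvStride2 (x :: xs) = x :: pvStride2 (xs.drop 1) := by
  cases xs <;> simp [pvStride2]

lemma pvCols_cons4 (a b c d : Int) (rest : List Int) :
    pvCols (a :: b :: c :: d :: rest) = ((a, c), (b, d)) :: pvCols rest := by
  simp [pvCols, pvStride2_cons]

lemma pvRange4 (k : Nat) :
    PySem.List.pyRange 0 ((4 * k : Nat) : Int) 4 = (List.range k).map (fun (j : Nat) => 4 * (j : Int)) := by
  rw [PySem.List.pyRange_of_pos 0 ((4 * k : Nat) : Int) (by norm_num)]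
  have h : (if (0 : Int) < ((4 * k : Nat) : Int) then ((((4 * k : Nat) : Int) - 0 + 4 - 1) / 4).toNat else 0) = k := by
    split <;> omega
  rw [h]
  refine List.map_congr_left ?_
  intro x _
  omega

lemma pvShift (a b c d : Int) (rest : List Int) (j : Nat) :
    pvG (a :: b :: c :: d :: rest) (4 * ((j : Int) + 1)) = pvG rest (4 * (j : Int)) := by
  have e0 : (4 * ((j : Int) + 1)) = ((4 * j + 4 : Nat) : Int) := by push_cast; ring
  have e1 : (4 * ((j : Int) + 1) + 1) = ((4 * j + 5 : Nat) : Int) := by push_cast; ring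
  have e2 : (4 * ((j : Int) + 1) + 2) = ((4 * j + 6 : Nat) : Int) := by push_cast; ring
  have e3 : (4 * ((j : Int) + 1) + 3) = ((4 * j + 7 : Nat) : Int) := by push_cast; ring
  have f1 : (4 * (j : Int) + 1) = ((4 * j + 1 : Nat) : Int) := by push_cast; ring
  have f2 : (4 * (j : Int) + 2) = ((4 * j + 2 : Nat) : Int) := by push_cast; ring
  have f3 : (4 * (j : Int) + 3) = ((4 * j + 3 : Nat) : Int) := by push_cast; ring
  have f0 : (4 * (j : Int)) = ((4 * j : Nat) : Int) := by push_cast; ring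
  unfold pvG
  rw [e3, e2, e1, e0, f3, f2, f1, f0]
  simp only [PySem.List.pyGetD_natCast]
  have g4 : 4 * j + 4 = (4 * j) + 1 + 1 + 1 + 1 := by omega
  have g5 : 4 * j + 5 = (4 * j + 1) + 1 + 1 + 1 + 1 := by omega
  have g6 : 4 * j + 6 = (4 * j + 2) + 1 + 1 + 1 + 1 := by omega
  have g7 : 4 * j + 7 = (4 * j + 3) + 1 + 1 + 1 + 1 := by omega
  rw [g4, g5, g6, g7]
  simp

lemma pvHead (a b c d : Int) (rest : List Int) :
    pvG (a :: b :: c :: d :: rest) (4 * ((0 : Nat) : Int)) = ((a, c), (b, d)) := by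
  have e0 : (4 * ((0 : Nat) : Int)) = ((0 : Nat) : Int) := by norm_num
  have e1 : (4 * ((0 : Nat) : Int) + 1) = ((1 : Nat) : Int) := by norm_num
  have e2 : (4 * ((0 : Nat) : Int) + 2) = ((2 : Nat) : Int) := by norm_num
  have e3 : (4 * ((0 : Nat) : Int) + 3) = ((3 : Nat) : Int) := by norm_num
  unfold pvG
  rw [e3, e2, e1, e0]
  simp only [PySem.List.pyGetD_natCast]
  rfl

lemma pvMain : ∀ (k : Nat) (ids : List Int), ids.length = 4 * k →
    (List.range k).map (fun (j : Nat) => pvG ids (4 * (j : Int))) = pvCols ids := by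
  intro k
  induction k with
  | zero =>
    intro ids h
    have : ids = [] := List.eq_nil_of_length_eq_zero (by omega)
    subst this
    simp [pvCols, pvStride2]
  | succ k ih =>
    intro ids h
    match ids, h with
    | a :: b :: c :: d :: rest, h =>
      have hr : rest.length = 4 * k := by simp at h; omega
      have hrg : List.range (k + 1) = 0 :: (List.range k).map Nat.succ :=
        List.range_succ_eq_map
      rw [hrg]
      simp only [List.map_cons, List.map_map, Function.comp_def]
      rw [pvHead]
      have hpt : ∀ j ∈ List.range k,
          pvG (a :: b :: c :: d :: rest) (4 * ((Nat.succ j : Nat) : Int)) = pvG rest (4 * (j : Int)) := by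
        intro j _
        have : ((Nat.succ j : Nat) : Int) = (j : Int) + 1 := by push_cast; ring
        rw [this, pvShift]
      rw [List.map_congr_left hpt, ih rest hr, pvCols_cons4]

-- ===== VERDICT (by name: the statement is the Claim_ definition above) =====
theorem generate_by_ranking_pairs_spec : Claim_equal_generate_by_ranking_pairs := by
  intro ids _ hpre
  unfold Spec_generate_by_ranking_pairs generate_by_ranking_pairs generate_by_ranking_pairs_alt
  have hg : ¬ ((ids.length : Int) % 4 ≠ 0) := by
    unfold Pre_generate_by_ranking_pairs at hpre; omega
  simp only [hg, if_false]
  obtain ⟨k, hk⟩ : ∃ k, ids.length = 4 * k := ⟨ids.length / 4, by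
    unfold Pre_generate_by_ranking_pairs at hpre; omega⟩
  show (PySem.List.pyRange 0 (ids.length : Int) 4).foldl
      (fun result i => result ++ [pvG ids i]) [] = pvCols ids
  have hfold := PySem.List.foldl_append_singleton_eq_map (fun i => pvG ids i)
      (PySem.List.pyRange 0 (ids.length : Int) 4) []
  simp only [List.nil_append] at hfold
  rw [hfold]
  have hcast : (ids.length : Int) = ((4 * k : Nat) : Int) := by rw [hk]
  rw [hcast, pvRange4, List.map_map]
  exact pvMain k ids hk
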